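-- pv_equiv track=rewrite | github.com/BalajiVS-DS/task | degree_score_pyth.py | get_specialization_score_grouped
-- ===== SOURCE A (Python) =====
-- def get_specialization_score_grouped(required_specializations, candidate_specialization, similarity_groups):
--     candidate_specialization = candidate_specialization.strip().lower()
--     best_score = 0
--
--     for req_spec in required_specializations:
--         req_spec = req_spec.strip().lower()
--         if candidate_specialization == req_spec:
--             return 100
--
--         for group, score in similarity_groups:
--             group_lower = {s.lower() for s in group}
--             if candidate_specialization in group_lower and req_spec in group_lower:
--                 best_score = max(best_score, score)
--
--     return best_score
-- ===== SOURCE B (Python) =====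
-- def get_specialization_score_grouped(required_specializations, candidate_specialization, similarity_groups):
--     candidate = candidate_specialization.strip().lower()
--     required_set = set()
--     for req_spec in required_specializations:
--         req = req_spec.strip().lower()
--         if candidate == req:
--             return 100
--         required_set.add(req)
--     best_score = 0
--     for group, score in similarity_groups:
--         group_lower = {s.lower() for s in group}
--         if candidate in group_lower and not required_set.isdisjoint(group_lower):
--             best_score = max(best_score, score)
--     return best_score
-- ===== Notes on version B (the rewrite author's own statement) =====
-- stated objective: faster
-- what changed: B first scans the required specializations once (early-return 100 on an exact match) while collecting them into a set, then makes a single pass over similarity_groups taking the best score of any group containing the candidate and intersecting the required set, instead of A's rescan of all groups for every required specialization.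
import Mathlib
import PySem

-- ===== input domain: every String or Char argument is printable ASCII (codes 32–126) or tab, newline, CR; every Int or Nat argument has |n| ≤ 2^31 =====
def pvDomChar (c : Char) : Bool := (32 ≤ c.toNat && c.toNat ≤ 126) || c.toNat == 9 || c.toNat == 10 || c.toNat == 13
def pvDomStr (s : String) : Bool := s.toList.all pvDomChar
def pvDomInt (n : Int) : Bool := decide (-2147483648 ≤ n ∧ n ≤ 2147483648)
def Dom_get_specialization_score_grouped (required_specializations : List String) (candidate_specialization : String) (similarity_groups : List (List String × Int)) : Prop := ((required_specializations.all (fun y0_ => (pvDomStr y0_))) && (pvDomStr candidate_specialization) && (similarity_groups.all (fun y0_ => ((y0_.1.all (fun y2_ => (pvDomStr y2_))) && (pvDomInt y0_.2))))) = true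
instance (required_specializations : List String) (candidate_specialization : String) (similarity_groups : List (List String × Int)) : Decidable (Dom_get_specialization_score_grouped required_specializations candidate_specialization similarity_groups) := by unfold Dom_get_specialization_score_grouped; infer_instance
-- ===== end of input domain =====

-- B replaces A's per-required rescan of all similarity groups by one pass over the
-- required list (building a set, with A's early-return-100 preserved) followed by a
-- single pass over the groups testing intersection with that set (objective: faster).

-- ===== PORT A =====
-- {s.lower() for s in group}  (shared by both ports: the same set comprehension appears in A and B)
def pvGL (g : List String) : PySem.Set String := PySem.Set.ofList (g.map PySem.Str.lower)

-- the outer 'for req_spec in required_specializations' loop of A, with its early return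
def pvALoop (cand : String) (groups : List (List String × Int)) : List String → Int → Int
  | [], best => best
  | r :: rs, best =>
    let req := PySem.Str.lower (PySem.Str.strip r)
    if cand = req then 100
    else pvALoop cand groups rs
      (groups.foldl (fun b gs =>
        if cand ∈ pvGL gs.1 ∧ req ∈ pvGL gs.1 then max b gs.2 else b) best)

def get_specialization_score_grouped (required_specializations : List String) (candidate_specialization : String) (similarity_groups : List (List String × Int)) : Int :=
  let cand := PySem.Str.lower (PySem.Str.strip candidate_specialization)
  pvALoop cand similarity_groups required_specializations 0

-- ===== PORT B =====
-- B's first loop: collect the required set; 'none' = the early 'return 100' fired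
def pvBSet (cand : String) : List String → PySem.Set String → Option (PySem.Set String)
  | [], acc => some acc
  | r :: rs, acc =>
    let req := PySem.Str.lower (PySem.Str.strip r)
    if cand = req then none else pvBSet cand rs (PySem.Set.add acc req)

def get_specialization_score_grouped_alt (required_specializations : List String) (candidate_specialization : String) (similarity_groups : List (List String × Int)) : Int :=
  let cand := PySem.Str.lower (PySem.Str.strip candidate_specialization)
  match pvBSet cand required_specializations PySem.Set.empty with
  | none => 100
  | some required_set =>
    similarity_groups.foldl (fun b gs =>
      if cand ∈ pvGL gs.1 ∧ PySem.Set.isdisjoint required_set (pvGL gs.1) = false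
      then max b gs.2 else b) 0

-- ===== PRECONDITION & SPEC =====
def Spec_get_specialization_score_grouped (required_specializations : List String) (candidate_specialization : String) (similarity_groups : List (List String × Int)) (out : Int) : Prop := out = get_specialization_score_grouped_alt required_specializations candidate_specialization similarity_groups
instance (required_specializations : List String) (candidate_specialization : String) (similarity_groups : List (List String × Int)) (out : Int) : Decidable (Spec_get_specialization_score_grouped required_specializations candidate_specialization similarity_groups out) := by unfold Spec_get_specialization_score_grouped; infer_instance

-- ===== CLAIM (what is proved, stated in full; the proofs are below) =====
def Claim_equal_get_specialization_score_grouped : Prop := ∀ (required_specializations : List String) (candidate_specialization : String) (similarity_groups : List (List String × Int)), Dom_get_specialization_score_grouped required_specializations candidate_specialization similarity_groups → Spec_get_specialization_score_grouped required_specializations candidate_specialization similarity_groups (get_specialization_score_grouped required_specializations candidate_specialization similarity_groups)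

-- ===== LEMMAS AND PROOFS =====

-- a conditional max-fold is a plain max-fold over the filtered score list
theorem pv_condfold_eq {α : Type} (p : α → Prop) [DecidablePred p] (f : α → Int) :
    ∀ (L : List α) (best : Int),
      L.foldl (fun b a => if p a then max b (f a) else b) best
        = (L.filterMap (fun a => if p a then some (f a) else none)).foldl max best := by
  intro L
  induction L with
  | nil => intro best; simp
  | cons a L ih =>
    intro best
    by_cases h : p a <;> simp [h, ih]

theorem pv_mem_filt {α β : Type} (p : α → Prop) [DecidablePred p] (f : α → β)
    (L : List α) (x : β) :
    x ∈ L.filterMap (fun a => if p a then some (f a) else none) ↔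
      ∃ a ∈ L, p a ∧ f a = x := by
  simp only [List.mem_filterMap]
  constructor
  · rintro ⟨a, ha, h⟩
    by_cases hp : p a
    · simp [hp] at h; exact ⟨a, ha, hp, h⟩
    · simp [hp] at h
  · rintro ⟨a, ha, hp, h⟩
    exact ⟨a, ha, by simp [hp, h]⟩

theorem pv_foldl_max_char : ∀ (L : List Int) (best : Int),
    best ≤ L.foldl max best ∧ (∀ x ∈ L, x ≤ L.foldl max best) ∧
      (L.foldl max best = best ∨ L.foldl max best ∈ L) := by
  intro L
  induction L with
  | nil => intro best; simp
  | cons a L ih =>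
    intro best
    obtain ⟨h1, h2, h3⟩ := ih (max best a)
    refine ⟨le_trans (le_max_left _ _) h1, ?_, ?_⟩
    · intro x hx
      rcases List.mem_cons.mp hx with rfl | hx
      · exact le_trans (le_max_right _ _) h1
      · exact h2 x hx
    · rcases h3 with h3 | h3
      · rcases max_choice best a with hm | hm
        · left; simp only [List.foldl_cons]; omega
        · right; simp only [List.foldl_cons]; rw [h3, hm]; exact List.mem_cons_self
      · right; exact List.mem_cons_of_mem _ h3

theorem pv_foldl_max_congr (L1 L2 : List Int) (best : Int)
    (h : ∀ x, x ∈ L1 ↔ x ∈ L2) : L1.foldl max best = L2.foldl max best := by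
  obtain ⟨a1, b1, c1⟩ := pv_foldl_max_char L1 best
  obtain ⟨a2, b2, c2⟩ := pv_foldl_max_char L2 best
  apply le_antisymm
  · rcases c1 with e | e
    · omega
    · exact b2 _ ((h _).mp e)
  · rcases c2 with e | e
    · omega
    · exact b1 _ ((h _).mpr e)

-- the per-required filtered score list of A
def pvFilt (cand req : String) (groups : List (List String × Int)) : List Int :=
  groups.filterMap (fun gs =>
    if cand ∈ pvGL gs.1 ∧ req ∈ pvGL gs.1 then some gs.2 else none)

theorem pvALoop_match (cand : String) (groups : List (List String × Int)) :
    ∀ (rs : List String) (best : Int),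
      (∃ r ∈ rs, cand = PySem.Str.lower (PySem.Str.strip r)) →
      pvALoop cand groups rs best = 100 := by
  intro rs
  induction rs with
  | nil => rintro best ⟨r, h, _⟩; exact absurd h (List.not_mem_nil)
  | cons r rs ih =>
    rintro best ⟨r', hr', he⟩
    by_cases h : cand = PySem.Str.lower (PySem.Str.strip r)
    · simp [pvALoop, h]
    · rcases List.mem_cons.mp hr' with rfl | hm
      · exact absurd he h
      · simp only [pvALoop, if_neg h]
        exact ih _ ⟨r', hm, he⟩

theorem pvALoop_nomatch (cand : String) (groups : List (List String × Int)) :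
    ∀ (rs : List String) (best : Int),
      (∀ r ∈ rs, cand ≠ PySem.Str.lower (PySem.Str.strip r)) →
      pvALoop cand groups rs best
        = (rs.flatMap (fun r => pvFilt cand (PySem.Str.lower (PySem.Str.strip r)) groups)).foldl max best := by
  intro rs
  induction rs with
  | nil => intro best _; simp [pvALoop]
  | cons r rs ih =>
    intro best h
    have hr : cand ≠ PySem.Str.lower (PySem.Str.strip r) := h r List.mem_cons_self
    simp only [pvALoop, if_neg hr]
    rw [ih _ (fun r' hm => h r' (List.mem_cons_of_mem _ hm))]
    rw [List.flatMap_cons, List.foldl_append]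
    congr 1
    exact pv_condfold_eq _ _ groups best

theorem pvBSet_match (cand : String) :
    ∀ (rs : List String) (acc : PySem.Set String),
      (∃ r ∈ rs, cand = PySem.Str.lower (PySem.Str.strip r)) →
      pvBSet cand rs acc = none := by
  intro rs
  induction rs with
  | nil => rintro acc ⟨r, h, _⟩; exact absurd h (List.not_mem_nil)
  | cons r rs ih =>
    rintro acc ⟨r', hr', he⟩
    by_cases h : cand = PySem.Str.lower (PySem.Str.strip r)
    · simp [pvBSet, h]
    · rcases List.mem_cons.mp hr' with rfl | hm
      · exact absurd he h
      · simp only [pvBSet, if_neg h]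
        exact ih _ ⟨r', hm, he⟩

theorem pvBSet_nomatch (cand : String) :
    ∀ (rs : List String) (acc : PySem.Set String),
      (∀ r ∈ rs, cand ≠ PySem.Str.lower (PySem.Str.strip r)) →
      ∃ S, pvBSet cand rs acc = some S ∧
        ∀ x, x ∈ S ↔ x ∈ acc ∨ ∃ r ∈ rs, x = PySem.Str.lower (PySem.Str.strip r) := by
  intro rs
  induction rs with
  | nil => intro acc _; exact ⟨acc, rfl, by simp⟩
  | cons r rs ih =>
    intro acc h
    have hr : cand ≠ PySem.Str.lower (PySem.Str.strip r) := h r List.mem_cons_self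
    obtain ⟨S, hS, hmem⟩ := ih (PySem.Set.add acc (PySem.Str.lower (PySem.Str.strip r)))
      (fun r' hm => h r' (List.mem_cons_of_mem _ hm))
    refine ⟨S, by simp only [pvBSet, if_neg hr]; exact hS, ?_⟩
    intro x
    rw [hmem x, PySem.Set.mem_add]
    constructor
    · rintro (⟨hx | hx⟩ | ⟨r', hm, he⟩)
      · exact Or.inl hx
      · exact Or.inr ⟨r, List.mem_cons_self, hx⟩
      · exact Or.inr ⟨r', List.mem_cons_of_mem _ hm, he⟩
    · rintro (hx | ⟨r', hm, he⟩)
      · exact Or.inl (Or.inl hx)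
      · rcases List.mem_cons.mp hm with rfl | hm'
        · exact Or.inl (Or.inr he)
        · exact Or.inr ⟨r', hm', he⟩

theorem get_specialization_score_grouped_eq (required_specializations : List String)
    (candidate_specialization : String) (similarity_groups : List (List String × Int)) :
    get_specialization_score_grouped required_specializations candidate_specialization similarity_groups
      = get_specialization_score_grouped_alt required_specializations candidate_specialization similarity_groups := by
  simp only [get_specialization_score_grouped, get_specialization_score_grouped_alt]
  by_cases h : ∃ r ∈ required_specializations,
      PySem.Str.lower (PySem.Str.strip candidate_specialization) = PySem.Str.lower (PySem.Str.strip r)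
  · rw [pvALoop_match _ similarity_groups _ _ h, pvBSet_match _ _ PySem.Set.empty h]
  · push Not at h
    obtain ⟨S, hS, hmem⟩ := pvBSet_nomatch _ _ PySem.Set.empty h
    rw [pvALoop_nomatch _ similarity_groups _ _ h, hS]
    simp only
    rw [pv_condfold_eq
      (fun gs => PySem.Str.lower (PySem.Str.strip candidate_specialization) ∈ pvGL gs.1 ∧ PySem.Set.isdisjoint S (pvGL gs.1) = false) Prod.snd]
    apply pv_foldl_max_congr
    intro x
    rw [pv_mem_filt]
    constructor
    · intro hx
      rw [List.mem_flatMap] at hx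
      obtain ⟨r, hr, hxr⟩ := hx
      rw [pvFilt, pv_mem_filt] at hxr
      obtain ⟨gs, hgs, ⟨hcand, hreq⟩, hval⟩ := hxr
      refine ⟨gs, hgs, ⟨hcand, ?_⟩, hval⟩
      rw [Bool.eq_false_iff, Ne, PySem.Set.isdisjoint_iff]
      push Not
      exact ⟨_, (hmem _).mpr (Or.inr ⟨r, hr, rfl⟩), hreq⟩
    · rintro ⟨gs, hgs, ⟨hcand, hdisj⟩, hval⟩
      rw [Bool.eq_false_iff, Ne, PySem.Set.isdisjoint_iff] at hdisj
      push Not at hdisj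
      obtain ⟨y, hyS, hy⟩ := hdisj
      rcases (hmem y).mp hyS with hF | ⟨r, hr, rfl⟩
      · exact absurd hF (by simp [PySem.Set.empty])
      · rw [List.mem_flatMap]
        refine ⟨r, hr, ?_⟩
        rw [pvFilt, pv_mem_filt]
        exact ⟨gs, hgs, ⟨hcand, hy⟩, hval⟩

-- ===== VERDICT (by name: the statement is the Claim_ definition above) =====
theorem get_specialization_score_grouped_spec : Claim_equal_get_specialization_score_grouped := by
  intro reqs cand groups _
  exact get_specialization_score_grouped_eq reqs cand groups
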